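-- pv_equiv track=rewrite | github.com/Yusuf90/AdventOfCode-Solutions | AoC21_Yusuf/Day4/Puzzle1.py | checkBingoSheet
-- ===== SOURCE A (Python) =====
-- def checkBingoSheet(list_bingo_sheet):
--     #check horizontal
--     for _row in list_bingo_sheet:
--         if sum([item[1] for item in _row if item[1] == True]) == 5:
--             return True
--     #check vertical (by transposing the sheet first)
--     transposed_sheet = list(zip(*list_bingo_sheet))
--     for _row in transposed_sheet:
--         if sum([item[1] for item in _row if item[1] == True]) == 5:
--             return True
--     return False
-- ===== SOURCE B (Python) =====
-- def checkBingoSheet(list_bingo_sheet):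
--     # single pass: per-row marked count + running per-column marked counts
--     if not list_bingo_sheet:
--         return False
--     width = min(len(row) for row in list_bingo_sheet)
--     col_counts = [0] * width
--     any_row_complete = False
--     for row in list_bingo_sheet:
--         marked = sum(1 for item in row if item[1] == True)
--         if marked == 5:
--             any_row_complete = True
--         col_counts = [cc + (1 if item[1] == True else 0)
--                       for cc, item in zip(col_counts, row)]
--     return any_row_complete or 5 in col_counts
-- ===== Notes on version B (the rewrite author's own statement) =====
-- stated objective: alternative
-- what changed: Replaces A's two-phase row scan + explicit transpose-and-rescan with a single pass over the rows that maintains a per-row marked count and a running list of per-column marked counts (bounded to the minimum row width, matching zip truncation).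
import Mathlib
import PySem

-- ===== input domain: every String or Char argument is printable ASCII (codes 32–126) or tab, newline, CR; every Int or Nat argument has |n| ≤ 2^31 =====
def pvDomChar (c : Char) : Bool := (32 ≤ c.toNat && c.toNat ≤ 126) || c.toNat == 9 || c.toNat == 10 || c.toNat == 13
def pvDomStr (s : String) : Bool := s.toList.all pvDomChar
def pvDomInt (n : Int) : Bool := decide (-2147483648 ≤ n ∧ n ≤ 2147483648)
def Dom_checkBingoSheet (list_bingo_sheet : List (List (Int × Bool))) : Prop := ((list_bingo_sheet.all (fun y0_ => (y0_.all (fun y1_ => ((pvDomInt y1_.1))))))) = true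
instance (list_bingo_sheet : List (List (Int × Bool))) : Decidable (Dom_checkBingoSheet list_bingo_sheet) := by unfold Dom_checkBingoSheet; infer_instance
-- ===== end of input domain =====

-- B replaces A's two-phase scan (rows, then an explicit zip-transpose rescanned) by a
-- single pass maintaining per-row and per-column marked counts (objective: alternative).

-- ===== PORT A =====
-- sum([item[1] for item in _row if item[1] == True])  (Python sums booleans as 0/1)
def pvRowSum (row : List (Int × Bool)) : Int :=
  (((row.filter (fun item => item.2 == true)).map (fun item => if item.2 then (1 : Int) else 0))).sum

-- one of A's early-return loops: scan rows, return True on the first full one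
def pvCheckRows : List (List (Int × Bool)) → Bool
  | [] => false
  | r :: rs => if pvRowSum r == 5 then true else pvCheckRows rs

-- port of Python's zip(*rows): truncates every column to the minimum row length
def pvZip (rows : List (List (Int × Bool))) : List (List (Int × Bool)) :=
  match rows with
  | [] => []
  | r :: rs =>
    let m := rs.foldl (fun m row => min m row.length) r.length
    (List.range m).map (fun j => (r :: rs).map (fun row => row.getD j (0, false)))

def checkBingoSheet (list_bingo_sheet : List (List (Int × Bool))) : Bool :=
  if pvCheckRows list_bingo_sheet then true
  else if pvCheckRows (pvZip list_bingo_sheet) then true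
  else false

-- ===== PORT B =====
-- sum(1 for item in row if item[1] == True)
def pvCntMarked (row : List (Int × Bool)) : Int :=
  ((row.filter (fun item => item.2 == true)).map (fun _ => (1 : Int))).sum

-- [cc + (1 if item[1] == True else 0) for cc, item in zip(col_counts, row)]
def pvBumpCols (cols : List Int) (row : List (Int × Bool)) : List Int :=
  (cols.zip row).map (fun p => p.1 + if p.2.2 then 1 else 0)

def checkBingoSheet_alt (list_bingo_sheet : List (List (Int × Bool))) : Bool :=
  match list_bingo_sheet with
  | [] => false
  | r :: rs =>
    let width := rs.foldl (fun m row => min m row.length) r.length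
    let fin := (r :: rs).foldl
      (fun (st : Bool × List Int) row =>
        (st.1 || (pvCntMarked row == 5), pvBumpCols st.2 row))
      (false, List.replicate width 0)
    fin.1 || fin.2.contains 5

-- ===== PRECONDITION & SPEC =====
def Spec_checkBingoSheet (list_bingo_sheet : List (List (Int × Bool))) (out : Bool) : Prop := out = checkBingoSheet_alt list_bingo_sheet
instance (list_bingo_sheet : List (List (Int × Bool))) (out : Bool) : Decidable (Spec_checkBingoSheet list_bingo_sheet out) := by unfold Spec_checkBingoSheet; infer_instance

-- ===== CLAIM (what is proved, stated in full; the proofs are below) =====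
def Claim_equal_checkBingoSheet : Prop := ∀ (list_bingo_sheet : List (List (Int × Bool))), Dom_checkBingoSheet list_bingo_sheet → Spec_checkBingoSheet list_bingo_sheet (checkBingoSheet list_bingo_sheet)

-- ===== LEMMAS AND PROOFS =====

-- number of marked cells in column j (rows truncated by getD), proof-side only
def pvColCnt (rows : List (List (Int × Bool))) (j : Nat) : Int :=
  (rows.map (fun row => if (row.getD j ((0 : Int), false)).2 then (1 : Int) else 0)).sum

theorem pvCheckRows_eq_any (rows : List (List (Int × Bool))) :
    pvCheckRows rows = rows.any (fun r => pvRowSum r == 5) := by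
  induction rows with
  | nil => rfl
  | cons r rs ih => by_cases h : pvRowSum r == 5 <;> simp [pvCheckRows, h, ih]

theorem pvRowSum_eq (row : List (Int × Bool)) : pvRowSum row = pvCntMarked row := by
  induction row with
  | nil => rfl
  | cons it r ih =>
    by_cases h : it.2 <;>
      simp_all [pvRowSum, pvCntMarked]

theorem pvCnt_map_getD (rows : List (List (Int × Bool))) (j : Nat) :
    pvCntMarked (rows.map (fun row => row.getD j ((0 : Int), false))) = pvColCnt rows j := by
  induction rows with
  | nil => rfl
  | cons r rs ih =>
    by_cases h : (r.getD j ((0 : Int), false)).2 <;>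
      simp_all [pvCntMarked, pvColCnt]

theorem pvFold_min_le (rs : List (List (Int × Bool))) :
    ∀ a : Nat, rs.foldl (fun m row => min m row.length) a ≤ a ∧
      ∀ row ∈ rs, rs.foldl (fun m row => min m row.length) a ≤ row.length := by
  induction rs with
  | nil => intro a; simp
  | cons r rs ih =>
    intro a
    rcases ih (min a r.length) with ⟨h1, h2⟩
    refine ⟨le_trans h1 (by omega), ?_⟩
    intro row hrow
    rcases List.mem_cons.mp hrow with h | h
    · subst h; exact le_trans h1 (by omega)
    · exact h2 row h

theorem pvBump_length (cols : List Int) (row : List (Int × Bool)) :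
    (pvBumpCols cols row).length = min cols.length row.length := by
  simp [pvBumpCols]

theorem pvBump_getElem (cols : List Int) (row : List (Int × Bool)) (j : Nat)
    (hj : j < cols.length) (hr : j < row.length) :
    (pvBumpCols cols row)[j]'(by simp [pvBump_length]; omega) =
      cols[j] + if row[j].2 then 1 else 0 := by
  simp [pvBumpCols]

theorem pvFold_decomp (rows : List (List (Int × Bool))) :
    ∀ (hit : Bool) (cols : List Int),
      rows.foldl
        (fun (st : Bool × List Int) row =>
          (st.1 || (pvCntMarked row == 5), pvBumpCols st.2 row)) (hit, cols) =
      (hit || rows.any (fun r => pvCntMarked r == 5), rows.foldl pvBumpCols cols) := by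
  induction rows with
  | nil => intro hit cols; simp
  | cons r rs ih =>
    intro hit cols
    simp [List.foldl_cons, ih, Bool.or_assoc]

theorem pvFoldCols (rows : List (List (Int × Bool))) :
    ∀ cols : List Int, (∀ row ∈ rows, cols.length ≤ row.length) →
      (rows.foldl pvBumpCols cols).length = cols.length ∧
      ∀ j (hj : j < cols.length),
        (rows.foldl pvBumpCols cols)[j]? = some (cols[j] + pvColCnt rows j) := by
  induction rows with
  | nil =>
    intro cols _
    refine ⟨rfl, ?_⟩
    intro j hj
    simp [pvColCnt, List.getElem?_eq_getElem hj]
  | cons r rs ih =>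
    intro cols h
    have hr : cols.length ≤ r.length := h r (List.mem_cons_self ..)
    have hlen : (pvBumpCols cols r).length = cols.length := by
      rw [pvBump_length]; omega
    have h' : ∀ row ∈ rs, (pvBumpCols cols r).length ≤ row.length := by
      intro row hrow; rw [hlen]; exact h row (List.mem_cons_of_mem _ hrow)
    rcases ih (pvBumpCols cols r) h' with ⟨ih1, ih2⟩
    constructor
    · simpa [hlen] using ih1
    · intro j hj
      have hj' : j < (pvBumpCols cols r).length := by omega
      have := ih2 j hj'
      rw [List.foldl_cons, this, pvBump_getElem cols r j hj (by omega)]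
      have hgd : r.getD j ((0 : Int), false) = r[j]'(by omega) :=
        List.getD_eq_getElem r _ (by omega)
      simp only [pvColCnt, List.map_cons, List.sum_cons, hgd, Option.some.injEq]
      ring

-- ===== VERDICT
-- ===== VERDICT (by name: the statement is the Claim_ definition above) =====
theorem checkBingoSheet_spec : Claim_equal_checkBingoSheet := by
  intro l _
  unfold Spec_checkBingoSheet
  cases l with
  | nil => rfl
  | cons r rs =>
    rcases pvFold_min_le rs r.length with ⟨hle1, hle2⟩
    set m := rs.foldl (fun m row => min m row.length) r.length with hmdef
    have hrep : ∀ row ∈ r :: rs, (List.replicate m (0 : Int)).length ≤ row.length := by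
      intro row hrow
      rcases List.mem_cons.mp hrow with h | h
      · subst h; simpa using hle1
      · simpa using hle2 row h
    rcases pvFoldCols (r :: rs) (List.replicate m 0) hrep with ⟨Clen, Cget⟩
    set C := (r :: rs).foldl pvBumpCols (List.replicate m 0) with hC
    have ClenM : C.length = m := by simpa using Clen
    have CgetM : ∀ j, j < m → C[j]? = some (pvColCnt (r :: rs) j) := by
      intro j hj
      have := Cget j (by simpa using hj)
      simpa using this
    have hA : checkBingoSheet (r :: rs) =
        (pvCheckRows (r :: rs) || pvCheckRows (pvZip (r :: rs))) := by
      unfold checkBingoSheet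
      cases pvCheckRows (r :: rs) <;> cases pvCheckRows (pvZip (r :: rs)) <;> simp
    have hB : checkBingoSheet_alt (r :: rs) =
        ((r :: rs).any (fun row => pvCntMarked row == 5) || C.contains 5) := by
      unfold checkBingoSheet_alt
      simp only [pvFold_decomp, ← hmdef, ← hC, Bool.false_or]
    have step1 : pvCheckRows (pvZip (r :: rs)) =
        (List.range m).any (fun j => pvColCnt (r :: rs) j == 5) := by
      rw [pvCheckRows_eq_any]
      show ((List.range m).map
          (fun j => (r :: rs).map (fun row => row.getD j ((0 : Int), false)))).any
          (fun row => pvRowSum row == 5) = _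
      rw [List.any_map]
      simp only [Function.comp_def, pvRowSum_eq, pvCnt_map_getD]
    have step2 : C.contains 5 =
        (List.range m).any (fun j => pvColCnt (r :: rs) j == 5) := by
      rw [Bool.eq_iff_iff]
      constructor
      · intro hc
        have h5 : (5 : Int) ∈ C := by simpa using hc
        rcases List.mem_iff_getElem.mp h5 with ⟨j, hj, hCj⟩
        have hjm : j < m := by omega
        have := CgetM j hjm
        rw [List.getElem?_eq_getElem hj, hCj] at this
        refine List.any_eq_true.mpr ⟨j, List.mem_range.mpr hjm, ?_⟩
        simpa using this.symm
      · intro ha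
        rcases List.any_eq_true.mp ha with ⟨j, hj, hpj⟩
        have hjm : j < m := List.mem_range.mp hj
        have h5 : pvColCnt (r :: rs) j = 5 := by simpa using hpj
        have hj' : j < C.length := by omega
        have hCj : C[j] = 5 := by
          have := CgetM j hjm
          rw [List.getElem?_eq_getElem hj', h5] at this
          simpa using this
        have : (5 : Int) ∈ C := hCj ▸ List.getElem_mem hj'
        simpa using this
    rw [hA, hB, pvCheckRows_eq_any, step1, step2]
    simp only [pvRowSum_eq]
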